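-- pv_equiv track=rewrite | github.com/eka-care/KARMA-OpenMedEvalKit | karma/metrics/asr/lang/english_aligner.py | _generate_symbol_combinations
-- ===== SOURCE A (Python) =====
-- from typing import List, Tuple, Dict
-- from itertools import product
--
-- def _generate_symbol_combinations(symbols_info: List[tuple]) -> List[List[tuple]]:
--     """Generate all combinations of symbol word choices."""
--     if not symbols_info:
--         return []
--
--     # Extract just the word lists for each symbol
--     word_lists = [words for _, _, words in symbols_info]
--
--     # Generate all combinations
--     combinations = []
--     for combo in product(*word_lists):
--         # Rebuild the combo with position and symbol info
--         combo_with_info = []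
--         for i, (pos, symbol, _) in enumerate(symbols_info):
--             combo_with_info.append((pos, symbol, combo[i]))
--         combinations.append(combo_with_info)
--
--     return combinations
-- ===== SOURCE B (Python) =====
-- from typing import List
--
-- def _generate_symbol_combinations(symbols_info: List[tuple]) -> List[List[tuple]]:
--     """Generate all combinations of symbol word choices."""
--     if not symbols_info:
--         return []
--     result = [[]]
--     for pos, symbol, words in symbols_info:
--         result = [r + [(pos, symbol, w)] for r in result for w in words]
--     return result
-- ===== Notes on version B (the rewrite author's own statement) =====
-- stated objective: simpler
-- what changed: Replaces itertools.product over extracted word lists plus a separate enumerate-indexed rebuild loop with a single incremental fold that extends partial combinations with (pos, symbol, word) tuples directly.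
import Mathlib
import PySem

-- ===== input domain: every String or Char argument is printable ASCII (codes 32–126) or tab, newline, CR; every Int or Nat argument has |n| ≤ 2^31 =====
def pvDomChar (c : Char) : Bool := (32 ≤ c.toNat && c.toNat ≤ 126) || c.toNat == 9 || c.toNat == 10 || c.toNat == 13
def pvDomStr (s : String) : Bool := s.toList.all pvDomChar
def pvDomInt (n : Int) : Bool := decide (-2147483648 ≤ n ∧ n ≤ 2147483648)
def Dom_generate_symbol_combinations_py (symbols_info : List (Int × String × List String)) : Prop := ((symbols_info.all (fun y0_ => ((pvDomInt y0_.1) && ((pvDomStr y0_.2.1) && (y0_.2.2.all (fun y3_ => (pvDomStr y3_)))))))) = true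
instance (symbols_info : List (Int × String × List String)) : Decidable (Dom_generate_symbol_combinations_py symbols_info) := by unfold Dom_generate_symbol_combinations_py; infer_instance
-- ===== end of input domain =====

-- B replaces itertools.product + a separate enumerate-indexed rebuild loop with one
-- incremental fold extending partial combinations (objective: simpler decomposition).

-- ===== PORT A =====
-- itertools.product(*word_lists): first list varies slowest, last fastest
def pvProdA (wls : List (List String)) : List (List String) :=
  match wls with
  | [] => [[]]
  | ws :: rest => ws.flatMap (fun w => (pvProdA rest).map (fun c => w :: c))

-- the inner 'for i, (pos, symbol, _) in enumerate(symbols_info)' rebuild loop,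
-- carrying the enumerate counter i; combo[i] is combo.getD i (always in range here)
def pvRebuild (infos : List (Int × String × List String)) (combo : List String) (i : Nat) :
    List (Int × String × String) :=
  match infos with
  | [] => []
  | (p, s, _) :: rest => (p, s, combo.getD i "") :: pvRebuild rest combo (i + 1)

def generate_symbol_combinations_py (symbols_info : List (Int × String × List String)) :
    List (List (Int × String × String)) :=
  if symbols_info = [] then []
  else
    (pvProdA (symbols_info.map (fun x => x.2.2))).map (fun combo => pvRebuild symbols_info combo 0)

-- ===== PORT B =====
def generate_symbol_combinations_py_alt (symbols_info : List (Int × String × List String)) :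
    List (List (Int × String × String)) :=
  if symbols_info = [] then []
  else
    symbols_info.foldl
      (fun res x => res.flatMap (fun r => x.2.2.map (fun w => r ++ [(x.1, x.2.1, w)])))
      [[]]

-- ===== PRECONDITION & SPEC =====
def Spec_generate_symbol_combinations_py (symbols_info : List (Int × String × List String)) (out : List (List (Int × String × String))) : Prop := out = generate_symbol_combinations_py_alt symbols_info
instance (symbols_info : List (Int × String × List String)) (out : List (List (Int × String × String))) : Decidable (Spec_generate_symbol_combinations_py symbols_info out) := by unfold Spec_generate_symbol_combinations_py; infer_instance

-- ===== CLAIM (what is proved, stated in full; the proofs are below) =====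
def Claim_equal_generate_symbol_combinations_py : Prop := ∀ (symbols_info : List (Int × String × List String)), Dom_generate_symbol_combinations_py symbols_info → Spec_generate_symbol_combinations_py symbols_info (generate_symbol_combinations_py symbols_info)

-- ===== LEMMAS AND PROOFS =====

-- the full product of (pos, symbol, word) tuples, the common reference value
def pvFull (infos : List (Int × String × List String)) : List (List (Int × String × String)) :=
  match infos with
  | [] => [[]]
  | (p, s, ws) :: rest => ws.flatMap (fun w => (pvFull rest).map (fun c => (p, s, w) :: c))

theorem pvRebuild_shift (infos : List (Int × String × List String)) (w : String)
    (c : List String) (i : Nat) :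
    pvRebuild infos (w :: c) (i + 1) = pvRebuild infos c i := by
  induction infos generalizing i with
  | nil => rfl
  | cons x rest ih =>
    obtain ⟨p, s, ws⟩ := x
    simp [pvRebuild, ih]

theorem pvA_full (infos : List (Int × String × List String)) :
    (pvProdA (infos.map (fun x => x.2.2))).map (fun combo => pvRebuild infos combo 0)
      = pvFull infos := by
  induction infos with
  | nil => rfl
  | cons x rest ih =>
    obtain ⟨p, s, ws⟩ := x
    simp only [List.map_cons, pvProdA, pvFull, List.map_flatMap, List.map_map]
    congr 1
    funext w
    rw [← ih, List.map_map]
    apply List.map_congr_left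
    intro c _
    simp [Function.comp, pvRebuild, pvRebuild_shift]

theorem pvB_fold (infos : List (Int × String × List String))
    (acc : List (List (Int × String × String))) :
    infos.foldl
      (fun res x => res.flatMap (fun r => x.2.2.map (fun w => r ++ [(x.1, x.2.1, w)])))
      acc
      = acc.flatMap (fun r => (pvFull infos).map (fun c => r ++ c)) := by
  induction infos generalizing acc with
  | nil => simp [pvFull]
  | cons x rest ih =>
    obtain ⟨p, s, ws⟩ := x
    rw [List.foldl_cons, ih]
    simp only [pvFull, List.flatMap_assoc, List.map_flatMap, List.map_map]
    congr 1
    funext r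
    simp [List.flatMap_map, Function.comp_def, List.append_assoc]

-- ===== VERDICT (by name: the statement is the Claim_ definition above) =====
theorem generate_symbol_combinations_py_spec : Claim_equal_generate_symbol_combinations_py := by
  intro infos _
  unfold Spec_generate_symbol_combinations_py generate_symbol_combinations_py
    generate_symbol_combinations_py_alt
  by_cases h : infos = []
  · simp [h]
  · simp only [h, if_false]
    rw [pvA_full, pvB_fold]
    simp
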